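-- pv_equiv track=rewrite | github.com/reyn1920/online-production | generate_first_content.py | extract_spoken_content
-- ===== SOURCE A (Python) =====
-- def extract_spoken_content(script_content):
--     """Extract only the spoken content from the script"""
--     lines = script_content.split("\n")
--     spoken_lines = []
--
--     skip_sections = ["## Production Notes", "---", "###"]
--     in_skip_section = False
--
--     for line in lines:
--         # Skip markdown headers and production notes
--         if any(skip in line for skip in skip_sections):
--             in_skip_section = True
--             continue
--
--         # Skip empty lines and markdown formatting
--         if line.strip() == "" or line.startswith("#") or line.startswith("-"):
--             continue
--
--         # Skip production notes section
--         if "Production Notes" in line or line.startswith("##"):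
--             in_skip_section = True
--             continue
--
--         if not in_skip_section and line.strip():
--             # Clean up any remaining markdown
--             clean_line = line.replace("**", "").replace("*", "").strip()
--             if clean_line and not clean_line.startswith("####"):
--                 spoken_lines.append(clean_line)
--
--     return "\n\n".join(spoken_lines)
-- ===== SOURCE B (Python) =====
-- def extract_spoken_content(script_content):
--     """Extract only the spoken content from the script (cutoff-then-map)."""
--     lines = script_content.split("\n")
--
--     def stops(line):
--         if any(skip in line for skip in ("## Production Notes", "---", "###")):
--             return True
--         if line.strip() == "" or line.startswith("#") or line.startswith("-"):
--             return False
--         return "Production Notes" in line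
--
--     cutoff = next((i for i, line in enumerate(lines) if stops(line)), len(lines))
--
--     spoken = []
--     for line in lines[:cutoff]:
--         if line.strip() == "" or line.startswith("#") or line.startswith("-"):
--             continue
--         clean = line.replace("**", "").replace("*", "").strip()
--         if clean and not clean.startswith("####"):
--             spoken.append(clean)
--     return "\n\n".join(spoken)
-- ===== Notes on version B (the rewrite author's own statement) =====
-- stated objective: simpler
-- what changed: Replaces A's single pass with a never-reset in_skip_section flag by an explicit two-phase decomposition: first find the cutoff (index of the first stop line), then collect and clean spoken lines from only the prefix before it.
import Mathlib
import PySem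

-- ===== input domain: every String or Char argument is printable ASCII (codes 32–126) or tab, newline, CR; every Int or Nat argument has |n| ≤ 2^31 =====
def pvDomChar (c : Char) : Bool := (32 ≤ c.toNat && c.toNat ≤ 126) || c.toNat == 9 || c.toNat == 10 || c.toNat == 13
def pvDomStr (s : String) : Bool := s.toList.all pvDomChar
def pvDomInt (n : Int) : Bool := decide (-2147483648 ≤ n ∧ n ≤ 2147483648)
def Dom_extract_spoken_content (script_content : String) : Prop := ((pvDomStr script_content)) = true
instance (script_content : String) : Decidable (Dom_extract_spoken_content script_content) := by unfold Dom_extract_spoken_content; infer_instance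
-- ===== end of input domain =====

-- B replaces A's never-reset skip flag by an explicit cutoff (index of the first stop line)
-- followed by a separate collection pass over the prefix; objective: simpler decomposition.

-- ===== PORT A =====
-- the loop body of A's for-loop, state = (in_skip_section, spoken_lines)
def pvStepA (st : Bool × List String) (line : String) : Bool × List String :=
  if PySem.Str.isIn "## Production Notes" line || PySem.Str.isIn "---" line || PySem.Str.isIn "###" line then
    (true, st.2)
  else if PySem.Str.strip line == "" || PySem.Str.startswith line "#" || PySem.Str.startswith line "-" then
    st
  else if PySem.Str.isIn "Production Notes" line || PySem.Str.startswith line "##" then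
    (true, st.2)
  else if !st.1 && !(PySem.Str.strip line == "") then
    let clean := PySem.Str.strip (PySem.Str.replace (PySem.Str.replace line "**" "") "*" "")
    if !(clean == "") && !PySem.Str.startswith clean "####" then (st.1, st.2 ++ [clean]) else st
  else st

def extract_spoken_content (script_content : String) : String :=
  -- split("\n"): the separator is the non-empty literal "\n", so split? never returns none
  let lines := (PySem.Str.split? script_content "\n").getD []
  PySem.Str.join "\n\n" (lines.foldl pvStepA (false, [])).2

-- ===== PORT B =====
-- skip filter shared by the stop predicate and the collection pass
def pvSkipLine (line : String) : Bool :=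
  PySem.Str.strip line == "" || PySem.Str.startswith line "#" || PySem.Str.startswith line "-"

-- stop predicate: the line would set A's one-way flag
def pvStops (line : String) : Bool :=
  if PySem.Str.isIn "## Production Notes" line || PySem.Str.isIn "---" line || PySem.Str.isIn "###" line then
    true
  else if pvSkipLine line then
    false
  else
    PySem.Str.isIn "Production Notes" line

-- collection filter: the cleaned line a kept line contributes, if any
def pvCollect (line : String) : Option String :=
  if pvSkipLine line then none
  else
    let clean := PySem.Str.strip (PySem.Str.replace (PySem.Str.replace line "**" "") "*" "")
    if !(clean == "") && !PySem.Str.startswith clean "####" then some clean else none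

def extract_spoken_content_alt (script_content : String) : String :=
  let lines := (PySem.Str.split? script_content "\n").getD []
  let cutoff := lines.findIdx pvStops            -- index of the first stop line (length if none)
  PySem.Str.join "\n\n" ((lines.take cutoff).filterMap pvCollect)

-- ===== PRECONDITION & SPEC =====
def Spec_extract_spoken_content (script_content : String) (out : String) : Prop := out = extract_spoken_content_alt script_content
instance (script_content : String) (out : String) : Decidable (Spec_extract_spoken_content script_content out) := by unfold Spec_extract_spoken_content; infer_instance

-- ===== CLAIM (what is proved, stated in full; the proofs are below) =====
def Claim_equal_extract_spoken_content : Prop := ∀ (script_content : String), Dom_extract_spoken_content script_content → Spec_extract_spoken_content script_content (extract_spoken_content script_content)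

-- ===== LEMMAS AND PROOFS =====

-- a line starting with "##" also starts with "#"
theorem pv_sw_hash {cs : List Char} (h : PySem.Chars.startswith cs ['#', '#'] = true) :
    PySem.Chars.startswith cs ['#'] = true := by
  rw [PySem.Chars.startswith_iff] at h ⊢
  exact List.IsPrefix.trans (by decide) h

-- once the flag is set, A's loop changes nothing
theorem pv_foldl_true (ls : List String) (acc : List String) :
    ls.foldl pvStepA (true, acc) = (true, acc) := by
  induction ls with
  | nil => rfl
  | cons l ls ih =>
    have hstep : pvStepA (true, acc) l = (true, acc) := by
      simp only [pvStepA]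
      split_ifs <;> simp_all
    simp [List.foldl_cons, hstep, ih]

-- A's loop body from an unset flag, phrased through B's two predicates
theorem pv_stepA_char (acc : List String) (l : String) :
    pvStepA (false, acc) l =
      if pvStops l then (true, acc) else (false, acc ++ (pvCollect l).toList) := by
  simp only [pvStepA, pvStops, pvCollect, pvSkipLine]
  by_cases h1 : (PySem.Str.isIn "## Production Notes" l || PySem.Str.isIn "---" l || PySem.Str.isIn "###" l) = true
  · simp_all
  · by_cases h2 : (PySem.Str.strip l == "" || PySem.Str.startswith l "#" || PySem.Str.startswith l "-") = true
    · simp_all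
    · have hhh : PySem.Chars.startswith l.toList ['#', '#'] = false := by
        cases hx : PySem.Chars.startswith l.toList ['#', '#']
        · rfl
        · exact absurd (pv_sw_hash hx) (by simp_all)
      by_cases h3 : PySem.Str.isIn "Production Notes" l = true
      · simp_all
      · simp_all
        split_ifs <;> simp_all

-- the main loop invariant: A's fold over any line list equals B's cutoff-prefix collection
theorem pv_foldl_false (ls : List String) (acc : List String) :
    (ls.foldl pvStepA (false, acc)).2
      = acc ++ (ls.take (ls.findIdx pvStops)).filterMap pvCollect := by
  induction ls generalizing acc with
  | nil => simp
  | cons l ls ih =>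
    rw [List.foldl_cons, pv_stepA_char, List.findIdx_cons]
    cases h : pvStops l with
    | true => simp [pv_foldl_true]
    | false =>
      simp only [cond_false, List.take_succ_cons, List.filterMap_cons]
      cases hc : pvCollect l with
      | none => simp [ih]
      | some v => simp [ih]

-- ===== VERDICT (by name: the statement is the Claim_ definition above) =====
theorem extract_spoken_content_spec : Claim_equal_extract_spoken_content := by
  intro s _
  unfold Spec_extract_spoken_content
  simp only [extract_spoken_content, extract_spoken_content_alt, pv_foldl_false, List.nil_append]
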